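-- pv_equiv track=rewrite | github.com/jhkeating/github-upload | decisionStump.py | find_expl_vars
-- ===== SOURCE A (Python) =====
-- def find_expl_vars(D):
-- 	variables = ["",""]
-- 	for i in range(len(D)):
-- 		for j in range(len(D[i])-1):
-- 			if variables[0] == "" and D[i][j] != "" :
-- 				variables[0] = D[i][j]
-- 			elif variables[0] != D[i][j]:
-- 				variables[1] = D[i][j]
-- 	return variables
-- ===== SOURCE B (Python) =====
-- def find_expl_vars(D):
--     flat = [c for row in D for c in row[:-1]]
--     v0 = next((x for x in flat if x != ""), "")
--     v1 = next((x for x in reversed(flat) if x != v0), "")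
--     return [v0, v1]
-- ===== Notes on version B (the rewrite author's own statement) =====
-- stated objective: simpler
-- what changed: Replaces A's nested index loops carrying a mutable two-slot accumulator with one flatten plus two early-exit searches: a forward search for the first nonempty cell and a reverse search for the last cell differing from it.
import Mathlib
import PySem

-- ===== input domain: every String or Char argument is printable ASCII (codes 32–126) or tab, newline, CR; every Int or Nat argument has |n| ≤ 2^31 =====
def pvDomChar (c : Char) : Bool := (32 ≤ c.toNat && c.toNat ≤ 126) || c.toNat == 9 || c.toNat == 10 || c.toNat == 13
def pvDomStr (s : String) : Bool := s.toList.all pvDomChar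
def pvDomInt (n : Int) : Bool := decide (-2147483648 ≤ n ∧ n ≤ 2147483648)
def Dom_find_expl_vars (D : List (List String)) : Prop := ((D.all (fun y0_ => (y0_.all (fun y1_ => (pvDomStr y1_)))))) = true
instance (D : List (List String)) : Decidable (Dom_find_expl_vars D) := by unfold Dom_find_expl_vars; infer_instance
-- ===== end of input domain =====

-- B replaces A's nested index loops and mutable two-slot list with a flatten plus a forward
-- first-nonempty search and a reverse last-differing search (objective: simpler).

-- ===== PORT A =====
def find_expl_vars (D : List (List String)) : List String :=
  let vars : List String := ["", ""]
  (PySem.List.pyRange 0 (PySem.List.len D) 1).foldl (fun vars i =>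
    let row := PySem.List.pyGetD D i []
    (PySem.List.pyRange 0 (PySem.List.len row - 1) 1).foldl (fun vars j =>
      if PySem.List.pyGetD vars 0 "" = "" ∧ PySem.List.pyGetD row j "" ≠ "" then
        vars.set 0 (PySem.List.pyGetD row j "")
      else if PySem.List.pyGetD vars 0 "" ≠ PySem.List.pyGetD row j "" then
        vars.set 1 (PySem.List.pyGetD row j "")
      else vars) vars) vars

-- ===== PORT B =====
def find_expl_vars_alt (D : List (List String)) : List String :=
  let flat := D.flatMap (fun row => PySem.List.slice row none (some (-1)))
  let v0 := (flat.find? (fun x => x != "")).getD ""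
  let v1 := (flat.reverse.find? (fun x => x != v0)).getD ""
  [v0, v1]

-- ===== PRECONDITION & SPEC =====
def Spec_find_expl_vars (D : List (List String)) (out : List String) : Prop := out = find_expl_vars_alt D
instance (D : List (List String)) (out : List String) : Decidable (Spec_find_expl_vars D out) := by unfold Spec_find_expl_vars; infer_instance

-- ===== CLAIM (what is proved, stated in full; the proofs are below) =====
def Claim_equal_find_expl_vars : Prop := ∀ (D : List (List String)), Dom_find_expl_vars D → Spec_find_expl_vars D (find_expl_vars D)

-- ===== LEMMAS AND PROOFS =====

-- A's loop body on the two-slot list state (definitionally the body of find_expl_vars)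
def pvStepA (vars : List String) (c : String) : List String :=
  if PySem.List.pyGetD vars 0 "" = "" ∧ c ≠ "" then vars.set 0 c
  else if PySem.List.pyGetD vars 0 "" ≠ c then vars.set 1 c
  else vars

-- A's inner loop as a function of the current state and the row
def pvG (vars : List String) (row : List String) : List String :=
  (PySem.List.pyRange 0 (PySem.List.len row - 1) 1).foldl
    (fun vars j => pvStepA vars (PySem.List.pyGetD row j "")) vars

-- the pair-state version of A's loop body
def pvStepP (s : String × String) (c : String) : String × String :=
  if s.1 = "" ∧ c ≠ "" then (c, s.2)
  else if s.1 ≠ c then (s.1, c) else s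

lemma pvFoldA_pair (xs : List String) : ∀ (v0 v1 : String),
    xs.foldl pvStepA [v0, v1]
    = [(xs.foldl pvStepP (v0, v1)).1, (xs.foldl pvStepP (v0, v1)).2] := by
  induction xs with
  | nil => intro v0 v1; rfl
  | cons x t ih =>
    intro v0 v1
    simp only [List.foldl_cons]
    have hstep : pvStepA [v0, v1] x = [(pvStepP (v0, v1) x).1, (pvStepP (v0, v1) x).2] := by
      simp [pvStepA, pvStepP, PySem.List.pyGetD, PySem.List.pyGet?, PySem.List.pyIdx?]
      split_ifs <;> rfl
    rw [hstep, ih]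

lemma pvFoldl_range_pyGetD {α β : Type} (f : β → α → β) (d : α) :
    ∀ (n : Nat) (xs : List α) (init : β), n ≤ xs.length →
    (List.range n).foldl (fun acc (j : Nat) => f acc (PySem.List.pyGetD xs (j : Int) d)) init
      = (xs.take n).foldl f init := by
  intro n
  induction n with
  | zero => intro xs init _; simp
  | succ m ih =>
    intro xs init h
    rw [List.range_succ, List.foldl_append, ih xs init (by omega)]
    have htake : xs.take (m + 1) = xs.take m ++ [xs[m]] := by
      rw [List.take_add_one]; simp [List.getElem?_eq_getElem (by omega : m < xs.length)]
    rw [htake, List.foldl_append]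
    simp only [List.foldl_cons, List.foldl_nil]
    rw [PySem.List.pyGetD_natCast]
    have hgd : xs.getD m d = xs[m] := by
      simp [List.getD, List.getElem?_eq_getElem (by omega : m < xs.length)]; rfl
    rw [hgd]

-- A's inner index loop over range(len(row)-1) is a fold over row.dropLast
lemma pvInner_fold {β : Type} (row : List String) (g : β → String → β) (init : β) :
    (PySem.List.pyRange 0 (PySem.List.len row - 1) 1).foldl
      (fun acc j => g acc (PySem.List.pyGetD row j "")) init
    = row.dropLast.foldl g init := by
  rw [PySem.List.pyRange_one]
  simp only [sub_zero, List.foldl_map, zero_add]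
  have hlen : ((PySem.List.len row - 1)).toNat = row.length - 1 := by
    simp only [PySem.List.len]; omega
  rw [hlen]
  rw [pvFoldl_range_pyGetD g "" (row.length - 1) row init (by omega), List.dropLast_eq_take]

-- A's outer index loop over range(len(D)) is a fold over D
lemma pvOuter (G : List String → List String → List String) (D : List (List String))
    (init : List String) :
    (PySem.List.pyRange 0 (PySem.List.len D) 1).foldl
      (fun vars i => G vars (PySem.List.pyGetD D i [])) init = D.foldl G init := by
  rw [PySem.List.pyRange_one]
  simp only [sub_zero, List.foldl_map, zero_add]
  have hlen : (PySem.List.len D).toNat = D.length := by simp [PySem.List.len]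
  rw [hlen, pvFoldl_range_pyGetD G [] D.length D init (le_refl _), List.take_length]

-- fold over a flatMap is the nested fold
lemma pvFoldl_flatMap {α β γ : Type} (f : α → List β) (g : γ → β → γ) :
    ∀ (xs : List α) (init : γ),
    (xs.flatMap f).foldl g init = xs.foldl (fun acc x => (f x).foldl g acc) init := by
  intro xs
  induction xs with
  | nil => intro init; rfl
  | cons x t ih => intro init; simp [List.flatMap_cons, List.foldl_append, ih]

-- phase 2: once the first slot holds a nonempty a, it stays a and the second slot ends up
-- as the last element different from a (= the first one of the reversed list), else unchanged
lemma pvPhase2 (a : String) (ha : a ≠ "") : ∀ (xs : List String) (v1 : String),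
    xs.foldl pvStepP (a, v1) = (a, ((xs.reverse.find? (fun x => x != a)).getD v1)) := by
  intro xs
  induction xs with
  | nil => intro v1; rfl
  | cons x t ih =>
    intro v1
    rw [List.foldl_cons]
    have hstep : pvStepP (a, v1) x = (a, if a ≠ x then x else v1) := by
      simp [pvStepP, ha]
      split_ifs <;> rfl
    rw [hstep, ih]
    simp only [List.reverse_cons, List.find?_append]
    cases hf : t.reverse.find? (fun x => x != a) with
    | some c => simp [hf]
    | none =>
      by_cases hax : a = x
      · subst hax; simp [hf]
      · simp [hf, Ne.symm hax, hax]

-- characterisation of A's accumulating pass: first nonempty, then last differing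
lemma pvMain : ∀ (xs : List String),
    xs.foldl pvStepP ("", "") =
      (((xs.find? (fun x => x != "")).getD ""),
       ((xs.reverse.find? (fun x => x != (xs.find? (fun x => x != "")).getD "")).getD "")) := by
  intro xs
  induction xs with
  | nil => rfl
  | cons x t ih =>
    by_cases hx : x = ""
    · subst hx
      rw [List.foldl_cons]
      have hid : pvStepP ("", "") "" = ("", "") := by simp [pvStepP]
      rw [hid, ih]
      simp only [List.reverse_cons, List.find?_append, List.find?_cons]
      have hpred : (("" : String) != "") = false := by decide
      rw [hpred]
      cases h0 : t.find? (fun x => x != "") with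
      | none =>
        simp only [Option.getD_none]
        cases hf : t.reverse.find? (fun x => x != "") with
        | some c => simp [hf, hpred]
        | none => simp [hf, hpred]
      | some a =>
        have ha : a ≠ "" := by
          have := List.find?_some h0
          simpa using this
        simp only [Option.getD_some]
        have hba : (("" : String) != a) = true := by simpa [bne_iff_ne] using Ne.symm ha
        cases hf : t.reverse.find? (fun x => x != a) with
        | some c => simp [hf]
        | none => simp [hf, hba]
    · rw [List.foldl_cons]
      have hstep : pvStepP ("", "") x = (x, "") := by simp [pvStepP, hx]
      rw [hstep, pvPhase2 x hx]
      have hhead : (x :: t).find? (fun x => x != "") = some x := by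
        simp [List.find?_cons, hx]
      rw [hhead]
      simp only [Option.getD_some, List.reverse_cons, List.find?_append]
      cases hf : t.reverse.find? (fun y => y != x) with
      | some c => simp [hf]
      | none => simp [hf]

-- ===== VERDICT (by name: the statement is the Claim_ definition above) =====
theorem find_expl_vars_spec : Claim_equal_find_expl_vars := by
  intro D _
  show find_expl_vars D = find_expl_vars_alt D
  have h1 : find_expl_vars D = D.foldl pvG ["", ""] := pvOuter pvG D ["", ""]
  have hG : pvG = fun acc row => row.dropLast.foldl pvStepA acc := by
    funext acc row
    exact pvInner_fold row pvStepA acc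
  have h2 : D.foldl pvG ["", ""]
      = (D.flatMap (fun row => row.dropLast)).foldl pvStepA ["", ""] := by
    rw [pvFoldl_flatMap, hG]
  have hs : (fun row : List String => PySem.List.slice row none (some (-1)))
      = (fun row : List String => row.dropLast) := by
    funext row; exact PySem.List.slice_to_neg_one row
  rw [h1, h2, pvFoldA_pair, pvMain]
  unfold find_expl_vars_alt
  simp only [hs]
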